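-- pv_equiv track=rewrite | github.com/rinodehi1978/resell-trap | src/yafuama/matcher.py | _models_color_suffix_match
-- ===== SOURCE A (Python) =====
-- def _models_color_suffix_match(models_a: set[str], models_b: set[str]) -> bool:
--     """Check if models match after ignoring color code suffixes.
--
--     Handles cases like HP04 vs HP04IBN, SV18 vs SV18FF, TP07 vs TP07WS
--     where the suffix is a 2+ letter color/SKU code appended to the base model.
--
--     Rules:
--     - One model must be a prefix of the other
--     - The remaining suffix must be purely alphabetical (no digits)
--     - Suffix must be 2+ characters (single-letter suffixes like 'K' may be variants)
--     """
--     for a in models_a: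
--         for b in models_b:
--             if a == b:
--                 continue
--             if len(b) > len(a) and b.startswith(a):
--                 suffix = b[len(a):]
--                 if suffix.isalpha() and len(suffix) >= 2:
--                     return True
--             if len(a) > len(b) and a.startswith(b):
--                 suffix = a[len(b):]
--                 if suffix.isalpha() and len(suffix) >= 2:
--                     return True
--     return False
-- ===== SOURCE B (Python) =====
-- def _models_color_suffix_match(models_a: set[str], models_b: set[str]) -> bool:
--     """Base-generation + set lookup instead of the all-pairs prefix scan."""
--     def bases(s):
--         n = len(s)
--         run = 0
--         for ch in s[::-1]:
--             if ch.isalpha():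
--                 run += 1
--             else:
--                 break
--         # every prefix whose removed suffix is all-alpha of length >= 2
--         return [s[:k] for k in range(n - run, n - 1)]
--
--     set_a = set(models_a)
--     set_b = set(models_b)
--     for b in models_b:
--         for base in bases(b):
--             if base in set_a:
--                 return True
--     for a in models_a:
--         for base in bases(a):
--             if base in set_b:
--                 return True
--     return False
-- ===== Notes on version B (the rewrite author's own statement) =====
-- stated objective: alternative
-- what changed: Replaced the all-pairs nested prefix/suffix scan by precomputing, for each string, its candidate base prefixes (trailing all-alpha suffix of length >= 2 removed) and testing them against a hash set of the other side.
import Mathlib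
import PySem

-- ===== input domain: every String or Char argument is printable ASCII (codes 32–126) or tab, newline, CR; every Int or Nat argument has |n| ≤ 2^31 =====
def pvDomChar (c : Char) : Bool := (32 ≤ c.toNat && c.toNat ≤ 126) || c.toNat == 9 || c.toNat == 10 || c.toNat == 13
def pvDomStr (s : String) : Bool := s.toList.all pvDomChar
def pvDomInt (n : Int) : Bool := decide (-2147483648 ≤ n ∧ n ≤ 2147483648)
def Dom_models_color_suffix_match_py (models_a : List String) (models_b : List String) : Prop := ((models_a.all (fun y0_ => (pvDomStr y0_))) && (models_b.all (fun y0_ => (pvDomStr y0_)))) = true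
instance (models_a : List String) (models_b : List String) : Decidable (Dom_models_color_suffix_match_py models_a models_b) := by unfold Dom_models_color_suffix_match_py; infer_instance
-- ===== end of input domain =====

-- B replaces A's all-pairs prefix/suffix scan by per-string candidate-base generation plus set membership; return values proved equal on all inputs.

-- ===== PORT A =====
def models_color_suffix_match_py (models_a : List String) (models_b : List String) : Bool :=
  models_a.any (fun a => models_b.any (fun b =>
    if a == b then false
    else
      (if decide (PySem.Str.len a < PySem.Str.len b) && PySem.Str.startswith b a then
         PySem.Str.strIsalpha (PySem.Str.slice b (some (PySem.Str.len a)) none) &&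
           decide (2 ≤ PySem.Str.len (PySem.Str.slice b (some (PySem.Str.len a)) none))
       else false)
      ||
      (if decide (PySem.Str.len b < PySem.Str.len a) && PySem.Str.startswith a b then
         PySem.Str.strIsalpha (PySem.Str.slice a (some (PySem.Str.len b)) none) &&
           decide (2 ≤ PySem.Str.len (PySem.Str.slice a (some (PySem.Str.len b)) none))
       else false)))

-- ===== PORT B =====
-- bases(s): scan s[::-1] counting the trailing alpha run, then [s[:k] for k in range(n-run, n-1)]
def pvBases (s : String) : List String :=
  let cs := s.toList
  let run : Int := ((cs.reverse.takeWhile PySem.Chars.isalpha).length : Int)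
  (PySem.List.pyRange (PySem.Chars.len cs - run) (PySem.Chars.len cs - 1) 1).map
    (fun k => String.ofList (PySem.List.slice cs none (some k)))

def models_color_suffix_match_py_alt (models_a : List String) (models_b : List String) : Bool :=
  let setA : PySem.Set String := PySem.Set.ofList models_a
  let setB : PySem.Set String := PySem.Set.ofList models_b
  (models_b.any (fun b => (pvBases b).any (fun x => setA.contains x))) ||
  (models_a.any (fun a => (pvBases a).any (fun x => setB.contains x)))

-- ===== PRECONDITION & SPEC =====
def Spec_models_color_suffix_match_py (models_a : List String) (models_b : List String) (out : Bool) : Prop := out = models_color_suffix_match_py_alt models_a models_b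
instance (models_a : List String) (models_b : List String) (out : Bool) : Decidable (Spec_models_color_suffix_match_py models_a models_b out) := by unfold Spec_models_color_suffix_match_py; infer_instance

-- ===== CLAIM (what is proved, stated in full; the proofs are below) =====
def Claim_equal_models_color_suffix_match_py : Prop := ∀ (models_a : List String) (models_b : List String), Dom_models_color_suffix_match_py models_a models_b → Spec_models_color_suffix_match_py models_a models_b (models_color_suffix_match_py models_a models_b)

-- ===== LEMMAS AND PROOFS =====

-- "x is a base of y": y is strictly longer, starts with x, and the removed suffix is all-alpha of length ≥ 2.
def pvIsBase (x y : List Char) : Prop :=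
  x.length < y.length ∧ x <+: y ∧ (y.drop x.length).all PySem.Chars.isalpha = true ∧ x.length + 2 ≤ y.length

lemma take_all_iff_le_takeWhile (p : Char → Bool) (l : List Char) (m : Nat) (h : m ≤ l.length) :
    (l.take m).all p = true ↔ m ≤ (l.takeWhile p).length := by
  induction l generalizing m with
  | nil => simp at h; simp [h]
  | cons c cs ih =>
    cases m with
    | zero => simp
    | succ m =>
      simp only [List.take_succ_cons, List.all_cons, Bool.and_eq_true, List.takeWhile]
      cases hp : p c with
      | false => simp [ih m (by simpa using h)]
      | true => simpa using ih m (by simpa using h)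

lemma drop_all_iff_run (l : List Char) (j : Nat) :
    (l.drop j).all PySem.Chars.isalpha = true ↔
      l.length - j ≤ (l.reverse.takeWhile PySem.Chars.isalpha).length := by
  have hd : l.drop j = (l.reverse.take (l.length - j)).reverse := by
    by_cases h : j ≤ l.length
    · rw [List.take_reverse, List.reverse_reverse, Nat.sub_sub_self h]
    · rw [List.drop_eq_nil_of_le (by omega), Nat.sub_eq_zero_of_le (by omega)]
      simp
  rw [hd, List.all_reverse]
  exact take_all_iff_le_takeWhile _ _ _ (by simp)

-- membership in pvBases is exactly pvIsBase
lemma mem_pvBases_iff (x y : String) : x ∈ pvBases y ↔ pvIsBase x.toList y.toList := by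
  unfold pvBases pvIsBase
  have hrun : (y.toList.reverse.takeWhile PySem.Chars.isalpha).length ≤ y.toList.length := by
    simpa using (List.takeWhile_sublist (l := y.toList.reverse) PySem.Chars.isalpha).length_le
  simp only [List.mem_map, PySem.Chars.len_eq, PySem.List.mem_pyRange_one]
  constructor
  · rintro ⟨k, ⟨hk1, hk2⟩, rfl⟩
    have hk0 : 0 ≤ k := by omega
    rw [PySem.List.slice_to y.toList hk0]
    simp only [String.toList_ofList, List.length_take]
    have hkn : k.toNat < y.toList.length := by omega
    have hmin : min k.toNat y.toList.length = k.toNat := by omega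
    rw [hmin]
    refine ⟨by omega, List.take_prefix _ _, ?_, by omega⟩
    rw [drop_all_iff_run]; omega
  · rintro ⟨h1, h2, h3, h4⟩
    refine ⟨(x.toList.length : Int), ⟨?_, by omega⟩, ?_⟩
    · rw [drop_all_iff_run] at h3; omega
    · rw [PySem.List.slice_to y.toList (Int.natCast_nonneg _), Int.toNat_natCast,
        ← List.prefix_iff_eq_take.mp h2, String.ofList_toList]

-- one directed branch of A's inner test is exactly pvIsBase
lemma base_bridge (x y : String) :
    ((if decide (PySem.Str.len x < PySem.Str.len y) && PySem.Str.startswith y x then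
        PySem.Str.strIsalpha (PySem.Str.slice y (some (PySem.Str.len x)) none) &&
          decide (2 ≤ PySem.Str.len (PySem.Str.slice y (some (PySem.Str.len x)) none))
      else false) = true) ↔ pvIsBase x.toList y.toList := by
  unfold pvIsBase
  simp only [pysem, PySem.Str.len_eq, Bool.and_eq_true, decide_eq_true_eq]
  split_ifs with h
  · simp only [PySem.Chars.strIsalpha, Bool.and_eq_true, Bool.not_eq_true',
      List.isEmpty_eq_false_iff, decide_eq_true_eq, List.length_drop]
    constructor
    · rintro ⟨⟨-, hall⟩, hlen⟩
      exact ⟨by exact_mod_cast h.1, h.2, hall, by omega⟩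
    · rintro ⟨h1, -, hall, h4⟩
      refine ⟨⟨?_, hall⟩, by simp only [String.length_toList] at *; omega⟩
      intro hnil
      have hlen0 : (List.drop x.toList.length y.toList).length = 0 := by rw [hnil]; rfl
      rw [List.length_drop] at hlen0
      omega
  · simp only [false_iff]
    rintro ⟨h1, h2, -, -⟩
    exact h ⟨by exact_mod_cast h1, h2⟩

-- A's inner test (with its a == b guard) equals "a base of b or b base of a"
lemma innerA_iff (a b : String) :
    ((if a == b then false
      else
        (if decide (PySem.Str.len a < PySem.Str.len b) && PySem.Str.startswith b a then
           PySem.Str.strIsalpha (PySem.Str.slice b (some (PySem.Str.len a)) none) &&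
             decide (2 ≤ PySem.Str.len (PySem.Str.slice b (some (PySem.Str.len a)) none))
         else false)
        ||
        (if decide (PySem.Str.len b < PySem.Str.len a) && PySem.Str.startswith a b then
           PySem.Str.strIsalpha (PySem.Str.slice a (some (PySem.Str.len b)) none) &&
             decide (2 ≤ PySem.Str.len (PySem.Str.slice a (some (PySem.Str.len b)) none))
         else false)) = true)
    ↔ (pvIsBase a.toList b.toList ∨ pvIsBase b.toList a.toList) := by
  by_cases hab : a = b
  · subst hab; simp [pvIsBase]
  · have hne : (a == b) = false := by simp [hab]
    rw [hne]
    simp only [Bool.false_eq_true, if_false, Bool.or_eq_true]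
    rw [base_bridge a b, base_bridge b a]

-- ===== VERDICT (by name: the statement is the Claim_ definition above) =====
theorem models_color_suffix_match_py_spec : Claim_equal_models_color_suffix_match_py := by
  intro A B _
  unfold Spec_models_color_suffix_match_py models_color_suffix_match_py models_color_suffix_match_py_alt
  rw [Bool.eq_iff_iff]
  simp only [List.any_eq_true, Bool.or_eq_true, PySem.Set.contains_iff, PySem.Set.mem_ofList]
  constructor
  · rintro ⟨a, ha, b, hb, h⟩
    rcases (innerA_iff a b).mp h with h' | h'
    · exact Or.inl ⟨b, hb, a, (mem_pvBases_iff a b).mpr h', ha⟩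
    · exact Or.inr ⟨a, ha, b, (mem_pvBases_iff b a).mpr h', hb⟩
  · rintro (⟨b, hb, x, hx, hxa⟩ | ⟨a, ha, x, hx, hxb⟩)
    · exact ⟨x, hxa, b, hb, (innerA_iff x b).mpr (Or.inl ((mem_pvBases_iff x b).mp hx))⟩
    · exact ⟨a, ha, x, hxb, (innerA_iff a x).mpr (Or.inr ((mem_pvBases_iff x a).mp hx))⟩
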